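-- pv_equiv track=rewrite | github.com/hendeletfonseca/prog-1 | exercicios-uri/1478.py | organizarMatriz
-- ===== SOURCE A (Python) =====
-- def organizarMatriz(matriz):
--     count = 1
--     for i in range(len(matriz)):
--         matriz[i][0] = i + 1
--         matriz[0][i] = i + 1
--         matriz[i][i] = 1
--     while count != len(matriz):
--         for t in range(len(matriz) - count):
--             matriz[t][t+count] = count+1
--             matriz[t+count][t] = count+1
--         count += 1
--     return matriz
-- ===== SOURCE B (Python) =====
-- def organizarMatriz(matriz):
--     n = len(matriz)
--     for i in range(n):
--         for j in range(n):
--             matriz[i][j] = abs(i - j) + 1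
--     return matriz
-- ===== Notes on version B (the rewrite author's own statement) =====
-- stated objective: simpler
-- what changed: B replaces A's diagonal-band fill (border/diagonal pass plus a widening-band while loop) with a single double loop writing the closed-form cell value abs(i-j)+1.
import Mathlib
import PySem

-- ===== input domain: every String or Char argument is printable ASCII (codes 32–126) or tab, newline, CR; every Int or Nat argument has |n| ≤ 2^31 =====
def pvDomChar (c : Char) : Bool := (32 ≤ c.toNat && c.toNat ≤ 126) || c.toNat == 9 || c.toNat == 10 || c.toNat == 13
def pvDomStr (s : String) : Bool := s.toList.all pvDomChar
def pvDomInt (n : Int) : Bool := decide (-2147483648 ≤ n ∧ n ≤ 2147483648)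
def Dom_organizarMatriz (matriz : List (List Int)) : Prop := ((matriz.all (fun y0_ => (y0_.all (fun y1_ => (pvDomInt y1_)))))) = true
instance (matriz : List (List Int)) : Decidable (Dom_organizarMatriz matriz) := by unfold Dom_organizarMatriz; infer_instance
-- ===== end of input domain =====

-- B replaces A's diagonal-band fill with one double loop writing the closed-form cell value
-- abs(i-j)+1 (objective: simpler). Both Pythons mutate the argument in place and return it;
-- the equivalence proved here is about the RETURN value (the in-place effect happens to coincide).

-- ===== PORT A =====
-- matriz[i][j] = v  (write is a no-op when out of range; under Pre_ all of A's writes are in range)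
def pvSetCell (m : List (List Int)) (i j : Nat) (v : Int) : List (List Int) :=
  m.modify i (fun row => row.set j v)

def organizarMatriz (matriz : List (List Int)) : List (List Int) :=
  let n := matriz.length
  -- for i in range(len(matriz)): matriz[i][0] = i+1; matriz[0][i] = i+1; matriz[i][i] = 1
  let m1 := (List.range n).foldl (fun m i =>
      pvSetCell (pvSetCell (pvSetCell m i 0 ((i : Int) + 1)) 0 i ((i : Int) + 1)) i i 1) matriz
  -- while count != len(matriz): … ; count += 1   — runs count = 1, …, n-1
  -- (for n = 0 the Python while loop never terminates; excluded by Pre_)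
  (List.range' 1 (n - 1)).foldl (fun m c =>
      (List.range (n - c)).foldl (fun m t =>
        pvSetCell (pvSetCell m t (t + c) ((c : Int) + 1)) (t + c) t ((c : Int) + 1)) m) m1

-- ===== PORT B =====
-- for i in range(n): for j in range(n): matriz[i][j] = abs(i-j)+1 — each cell of the first n
-- columns of each row is overwritten exactly once, so the double loop is ported as a per-cell map.
def organizarMatriz_alt (matriz : List (List Int)) : List (List Int) :=
  let n := matriz.length
  matriz.mapIdx (fun i row => row.mapIdx (fun j x =>
    if j < n then |(i : Int) - (j : Int)| + 1 else x))

-- ===== PRECONDITION & SPEC =====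
-- Pre_ excludes exactly the inputs on which Python A does not return: the empty matrix
-- (the while loop never terminates) and matrices with a row shorter than len(matriz)
-- (IndexError on one of A's writes).
def Pre_organizarMatriz (matriz : List (List Int)) : Prop :=
  matriz ≠ [] ∧ ∀ row ∈ matriz, matriz.length ≤ row.length
instance (matriz : List (List Int)) : Decidable (Pre_organizarMatriz matriz) := by
  unfold Pre_organizarMatriz; infer_instance

def pvWitness_organizarMatriz : List (List Int) := [[1, 2], [3, 4]]

def Spec_organizarMatriz (matriz : List (List Int)) (out : List (List Int)) : Prop := out = organizarMatriz_alt matriz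
instance (matriz : List (List Int)) (out : List (List Int)) : Decidable (Spec_organizarMatriz matriz out) := by unfold Spec_organizarMatriz; infer_instance

-- ===== CLAIM (what is proved, stated in full; the proofs are below) =====
def Claim_equal_organizarMatriz : Prop := ∀ (matriz : List (List Int)), Dom_organizarMatriz matriz → Pre_organizarMatriz matriz → Spec_organizarMatriz matriz (organizarMatriz matriz)

-- ===== LEMMAS AND PROOFS =====

-- the common closed-form cell value
def pvCellVal (a b : Nat) : Int := |(a : Int) - (b : Int)| + 1

-- A's writes, flattened to one list of (row, col, value) triples
def pvWrites (n : Nat) : List (Nat × Nat × Int) :=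
  (List.range n).flatMap (fun i =>
    ([(i, 0, ((i : Int) + 1)), (0, i, ((i : Int) + 1)), (i, i, (1 : Int))] : List (Nat × Nat × Int)))
  ++ (List.range' 1 (n - 1)).flatMap (fun c =>
      (List.range (n - c)).flatMap (fun t =>
        ([(t, t + c, ((c : Int) + 1)), (t + c, t, ((c : Int) + 1))] : List (Nat × Nat × Int))))

def pvStep (m : List (List Int)) (w : Nat × Nat × Int) : List (List Int) :=
  pvSetCell m w.1 w.2.1 w.2.2

def pvGetCell (m : List (List Int)) (a b : Nat) : Int := (m.getD a []).getD b 0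

lemma pvA_eq_foldWrites (m : List (List Int)) :
    organizarMatriz m = (pvWrites m.length).foldl pvStep m := by
  simp only [organizarMatriz, pvWrites, List.foldl_append, List.foldl_flatMap,
    List.foldl_cons, List.foldl_nil, pvStep]

lemma pvLength_setCell (m : List (List Int)) (i j : Nat) (v : Int) :
    (pvSetCell m i j v).length = m.length := by
  simp [pvSetCell]

lemma pvGetD_setCell (m : List (List Int)) (i j : Nat) (v : Int) (a : Nat) :
    (pvSetCell m i j v).getD a [] = if i = a then (m.getD a []).set j v else m.getD a [] := by
  simp only [pvSetCell, List.getD_eq_getElem?_getD, List.getElem?_modify]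
  cases h : m[a]? with
  | none => split <;> simp
  | some r => by_cases hia : i = a <;> simp [hia]

lemma pvRowlen_setCell (m : List (List Int)) (i j : Nat) (v : Int) (a : Nat) :
    ((pvSetCell m i j v).getD a []).length = (m.getD a []).length := by
  rw [pvGetD_setCell]; split <;> simp

lemma pvSet_getD (row : List Int) (j : Nat) (v : Int) :
    (row.set j v).getD j 0 = if j < row.length then v else row.getD j 0 := by
  by_cases h : j < row.length
  · rw [List.getD_eq_getElem _ _ (by simpa using h), if_pos h]
    simp
  · have h1 : row.length ≤ j := le_of_not_gt h
    rw [if_neg h, List.getD_eq_default _ _ (by simpa using h1), List.getD_eq_default _ _ h1]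

lemma pvGetCell_setCell (m : List (List Int)) (i j : Nat) (v : Int) (a b : Nat) :
    pvGetCell (pvSetCell m i j v) a b
      = if i = a ∧ j = b ∧ j < (m.getD a []).length then v else pvGetCell m a b := by
  unfold pvGetCell
  rw [pvGetD_setCell]
  by_cases hia : i = a
  · subst hia
    rw [if_pos rfl]
    by_cases hjb : j = b
    · subst hjb
      rw [pvSet_getD]
      simp
    · simp [List.getD_eq_getElem?_getD, hjb]
  · simp [hia]

lemma pvLength_foldl (ws : List (Nat × Nat × Int)) :
    ∀ (m : List (List Int)), (ws.foldl pvStep m).length = m.length := by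
  induction ws with
  | nil => intro m; rfl
  | cons w rest ih =>
    intro m
    simp only [List.foldl_cons]
    rw [ih, pvStep, pvLength_setCell]

lemma pvRowlen_foldl (ws : List (Nat × Nat × Int)) :
    ∀ (m : List (List Int)) (a : Nat),
      ((ws.foldl pvStep m).getD a []).length = (m.getD a []).length := by
  induction ws with
  | nil => intro m a; rfl
  | cons w rest ih =>
    intro m a
    simp only [List.foldl_cons]
    rw [ih, pvStep, pvRowlen_setCell]

lemma pvFoldl_writes_get (f : Nat → Nat → Int) (ws : List (Nat × Nat × Int)) :
    ∀ (m : List (List Int)) (a b : Nat),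
      (∀ w ∈ ws, w.2.2 = f w.1 w.2.1) →
      (∀ w ∈ ws, w.1 < m.length ∧ w.2.1 < (m.getD w.1 []).length) →
      pvGetCell (ws.foldl pvStep m) a b
        = if (a, b) ∈ ws.map (fun w => (w.1, w.2.1)) then f a b else pvGetCell m a b := by
  induction ws with
  | nil => intro m a b _ _; simp
  | cons w rest ih =>
    intro m a b hv hr
    simp only [List.foldl_cons]
    have hr' : ∀ w' ∈ rest, w'.1 < (pvStep m w).length ∧
        w'.2.1 < ((pvStep m w).getD w'.1 []).length := by
      intro w' hw'
      have := hr w' (List.mem_cons_of_mem _ hw')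
      rw [pvStep, pvLength_setCell, pvRowlen_setCell]
      exact this
    rw [ih (pvStep m w) a b (fun w' hw' => hv w' (List.mem_cons_of_mem _ hw')) hr']
    by_cases hrest : (a, b) ∈ rest.map (fun w => (w.1, w.2.1))
    · simp [hrest]
    · simp only [List.map_cons, List.mem_cons]
      rw [if_neg hrest, pvStep, pvGetCell_setCell]
      by_cases hw : w.1 = a ∧ w.2.1 = b
      · have hin := hr w List.mem_cons_self
        have hcond : w.1 = a ∧ w.2.1 = b ∧ w.2.1 < (m.getD a []).length := by
          refine ⟨hw.1, hw.2, ?_⟩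
          rw [← hw.1]; exact hin.2
        rw [if_pos hcond]
        have hmem : (a, b) = (w.1, w.2.1) ∨ (a, b) ∈ rest.map (fun w => (w.1, w.2.1)) := by
          left; rw [hw.1, hw.2]
        rw [if_pos hmem, hv w List.mem_cons_self, hw.1, hw.2]
      · have hne : ¬((a, b) = (w.1, w.2.1) ∨ (a, b) ∈ rest.map (fun w => (w.1, w.2.1))) := by
          rintro (h | h)
          · exact hw ⟨(Prod.mk.injEq _ _ _ _ ▸ h).1.symm, (Prod.mk.injEq _ _ _ _ ▸ h).2.symm⟩
          · exact hrest h
        rw [if_neg hne]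
        have hnc : ¬(w.1 = a ∧ w.2.1 = b ∧ w.2.1 < (m.getD a []).length) := by
          rintro ⟨h1, h2, _⟩; exact hw ⟨h1, h2⟩
        rw [if_neg hnc]

lemma pvCellVal_natAbs (a b : Nat) :
    pvCellVal a b = (((a : Int) - (b : Int)).natAbs : Int) + 1 := by
  unfold pvCellVal
  rw [Int.abs_eq_natAbs]

lemma pvWrites_bounds (n i j : Nat) (v : Int) (hw : (i, j, v) ∈ pvWrites n) :
    i < n ∧ j < n ∧ v = pvCellVal i j := by
  simp only [pvWrites, List.mem_append, List.mem_flatMap, List.mem_range, List.mem_range',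
    List.mem_cons, List.not_mem_nil, or_false, Prod.mk.injEq] at hw
  rcases hw with ⟨x, hx, h⟩ | ⟨c, ⟨d, hd, hc⟩, t, ht, h⟩
  · rcases h with ⟨rfl, rfl, rfl⟩ | ⟨rfl, rfl, rfl⟩ | ⟨rfl, rfl, rfl⟩ <;>
      refine ⟨by omega, by omega, ?_⟩ <;> rw [pvCellVal_natAbs] <;> omega
  · subst hc
    rcases h with ⟨rfl, rfl, rfl⟩ | ⟨rfl, rfl, rfl⟩ <;>
      refine ⟨by omega, by omega, ?_⟩ <;> rw [pvCellVal_natAbs] <;> omega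

lemma pvMem_cells (n a b : Nat) (ha : a < n) (hb : b < n) :
    (a, b) ∈ (pvWrites n).map (fun w => (w.1, w.2.1)) := by
  simp only [pvWrites, List.map_append, List.mem_append, List.map_flatMap, List.mem_flatMap,
    List.mem_range, List.mem_range', List.map_cons, List.map_nil, List.mem_cons,
    List.not_mem_nil, or_false, Prod.mk.injEq]
  rcases Nat.lt_trichotomy a b with hlt | heq | hgt
  · exact Or.inr ⟨b - a, ⟨b - a - 1, by omega, by omega⟩, a, by omega, Or.inl ⟨rfl, by omega⟩⟩
  · exact Or.inl ⟨a, ha, Or.inr (Or.inr ⟨rfl, by omega⟩)⟩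
  · exact Or.inr ⟨a - b, ⟨a - b - 1, by omega, by omega⟩, b, by omega, Or.inr ⟨by omega, rfl⟩⟩

lemma pvMem_cells_lt (n a b : Nat)
    (h : (a, b) ∈ (pvWrites n).map (fun w => (w.1, w.2.1))) : a < n ∧ b < n := by
  simp only [List.mem_map] at h
  obtain ⟨⟨i, j, v⟩, hw, heq⟩ := h
  cases heq
  have := pvWrites_bounds n i j v hw
  exact ⟨this.1, this.2.1⟩

lemma pvAlt_length (m : List (List Int)) : (organizarMatriz_alt m).length = m.length := by
  unfold organizarMatriz_alt
  simp

lemma pvAlt_getD (m : List (List Int)) (a : Nat) (ha : a < m.length) :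
    (organizarMatriz_alt m).getD a [] =
      (m.getD a []).mapIdx (fun j x => if j < m.length then |(a : Int) - (j : Int)| + 1 else x) := by
  rw [List.getD_eq_getElem _ _ (by rw [pvAlt_length]; exact ha), List.getD_eq_getElem _ _ ha]
  unfold organizarMatriz_alt
  simp

lemma pvAlt_rowlen (m : List (List Int)) (a : Nat) :
    ((organizarMatriz_alt m).getD a []).length = (m.getD a []).length := by
  by_cases ha : a < m.length
  · rw [pvAlt_getD m a ha]; simp
  · rw [List.getD_eq_default _ _ (by rw [pvAlt_length]; omega),
      List.getD_eq_default _ _ (by omega)]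

lemma pvAlt_getCell (m : List (List Int)) (a b : Nat) (ha : a < m.length)
    (hb : b < (m.getD a []).length) :
    pvGetCell (organizarMatriz_alt m) a b
      = if b < m.length then pvCellVal a b else pvGetCell m a b := by
  unfold pvGetCell
  rw [pvAlt_getD m a ha, List.getD_eq_getElem _ _ (by simpa using hb), List.getElem_mapIdx,
    List.getD_eq_getElem _ _ hb]
  split <;> simp [pvCellVal]

-- ===== VERDICT (by name: the statement is the Claim_ definition above) =====
theorem organizarMatriz_spec : Claim_equal_organizarMatriz := by
  intro m _ hpre
  unfold Spec_organizarMatriz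
  obtain ⟨-, hrows⟩ := hpre
  have hv : ∀ w ∈ pvWrites m.length, w.2.2 = pvCellVal w.1 w.2.1 := by
    intro w hw; obtain ⟨i, j, v⟩ := w
    exact (pvWrites_bounds m.length i j v hw).2.2
  have hr : ∀ w ∈ pvWrites m.length, w.1 < m.length ∧ w.2.1 < (m.getD w.1 []).length := by
    intro w hw; obtain ⟨i, j, v⟩ := w
    obtain ⟨h1, h2, -⟩ := pvWrites_bounds m.length i j v hw
    refine ⟨h1, ?_⟩
    rw [List.getD_eq_getElem _ _ h1]
    exact lt_of_lt_of_le h2 (hrows _ (List.getElem_mem h1))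
  have hlenA : (organizarMatriz m).length = m.length := by
    rw [pvA_eq_foldWrites, pvLength_foldl]
  apply List.ext_getElem (by rw [hlenA, pvAlt_length])
  intro a haA haB
  have ha : a < m.length := by omega
  have hrowA : ((organizarMatriz m)[a]'haA).length = (m[a]'ha).length := by
    rw [← List.getD_eq_getElem (organizarMatriz m) [] haA, ← List.getD_eq_getElem m [] ha,
      pvA_eq_foldWrites, pvRowlen_foldl]
  have hrowB : ((organizarMatriz_alt m)[a]'haB).length = (m[a]'ha).length := by
    rw [← List.getD_eq_getElem (organizarMatriz_alt m) [] haB, ← List.getD_eq_getElem m [] ha,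
      pvAlt_rowlen]
  apply List.ext_getElem (by rw [hrowA, hrowB])
  intro b hbA hbB
  have hb : b < (m.getD a []).length := by
    rw [List.getD_eq_getElem _ _ ha]; omega
  have hgetA : ((organizarMatriz m)[a]'haA)[b]'hbA = pvGetCell (organizarMatriz m) a b := by
    rw [pvGetCell, List.getD_eq_getElem _ _ haA, List.getD_eq_getElem _ _ hbA]
  have hgetB : ((organizarMatriz_alt m)[a]'haB)[b]'hbB
      = pvGetCell (organizarMatriz_alt m) a b := by
    rw [pvGetCell, List.getD_eq_getElem _ _ haB, List.getD_eq_getElem _ _ hbB]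
  rw [hgetA, hgetB, pvA_eq_foldWrites,
    pvFoldl_writes_get pvCellVal (pvWrites m.length) m a b hv hr,
    pvAlt_getCell m a b ha hb]
  by_cases hbn : b < m.length
  · rw [if_pos (pvMem_cells m.length a b ha hbn), if_pos hbn]
  · have hnot : (a, b) ∉ (pvWrites m.length).map (fun w => (w.1, w.2.1)) := fun hmem =>
      hbn (pvMem_cells_lt m.length a b hmem).2
    rw [if_neg hnot, if_neg hbn]
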